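-- pv_equiv track=rewrite | github.com/SummerJSun/Data-Mining-Projects | Apriori.py | calculate_support
-- ===== SOURCE A (Python) =====
-- def calculate_support(transactions, itemsets):
--     count = {}
--     for itemset in itemsets:
--         count[itemset] = 0
--         for transaction in transactions:
--             if set(itemset).issubset(set(transaction)):
--                 count[itemset] += 1
--     return count
-- ===== SOURCE B (Python) =====
-- def calculate_support(transactions, itemsets):
--     # Inverted index: one pass over the transactions builds item -> set of
--     # transaction indices; each itemset's support is then the size of the
--     # intersection of its items' posting sets (no per-itemset set rebuilds).
--     postings = {}
--     for i, transaction in enumerate(transactions):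
--         for item in transaction:
--             postings.setdefault(item, set()).add(i)
--     universe = set(range(len(transactions)))
--     count = {}
--     for itemset in itemsets:
--         acc = universe
--         for item in itemset:
--             acc = acc & postings.get(item, set())
--         count[itemset] = len(acc)
--     return count
-- ===== Notes on version B (the rewrite author's own statement) =====
-- stated objective: faster
-- what changed: Replaces the nested itemset-by-transaction subset test (rebuilding set(itemset) and set(transaction) for every pair) by an inverted index built in one pass over the transactions, so each itemset's support is the size of an intersection of posting sets.
import Mathlib
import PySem

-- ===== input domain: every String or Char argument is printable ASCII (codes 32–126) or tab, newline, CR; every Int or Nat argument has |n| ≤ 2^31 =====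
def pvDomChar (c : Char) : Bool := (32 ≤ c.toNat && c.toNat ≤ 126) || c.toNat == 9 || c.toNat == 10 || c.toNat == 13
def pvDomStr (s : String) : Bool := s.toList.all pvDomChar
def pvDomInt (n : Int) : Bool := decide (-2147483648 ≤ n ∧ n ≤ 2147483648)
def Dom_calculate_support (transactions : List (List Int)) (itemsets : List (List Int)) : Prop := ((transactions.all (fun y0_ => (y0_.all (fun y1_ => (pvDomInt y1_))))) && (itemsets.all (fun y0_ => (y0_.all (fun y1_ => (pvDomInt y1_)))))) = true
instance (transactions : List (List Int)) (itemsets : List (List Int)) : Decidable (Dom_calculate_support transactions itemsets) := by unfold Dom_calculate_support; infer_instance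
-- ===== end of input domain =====

-- B replaces A's per-pair subset tests by an inverted index (item -> set of
-- transaction indices) built once; support = size of the posting-set intersection.

-- ===== PORT A =====
def calculate_support (transactions : List (List Int)) (itemsets : List (List Int)) : List (List Int × Int) :=
  (itemsets.foldl
    (fun (count : PySem.Dict (List Int) Int) itemset =>
      transactions.foldl
        (fun count transaction =>
          if PySem.Set.issubset (PySem.Set.ofList itemset) (PySem.Set.ofList transaction) then
            count.modify itemset 0 (· + 1)
          else count)
        (count.insert itemset 0))
    PySem.Dict.empty).items

-- ===== PORT B =====
def calculate_support_alt (transactions : List (List Int)) (itemsets : List (List Int)) : List (List Int × Int) :=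
  -- postings = {}; for i, transaction in enumerate(transactions): for item in transaction: postings.setdefault(item, set()).add(i)
  let postings : PySem.Dict Int (PySem.Set Nat) :=
    transactions.zipIdx.foldl
      (fun d p => p.1.foldl (fun d item => d.modify item PySem.Set.empty (fun s => s.add p.2)) d)
      PySem.Dict.empty
  -- univ = set(range(len(transactions)))
  let univ : PySem.Set Nat := PySem.Set.ofList (List.range transactions.length)
  -- for itemset in itemsets: acc = univ; for item in itemset: acc = acc & postings.get(item, set()); count[itemset] = len(acc)
  (itemsets.foldl
    (fun (count : PySem.Dict (List Int) Int) itemset =>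
      count.insert itemset
        (PySem.Set.len (itemset.foldl
          (fun acc item => acc.inter (postings.getD item PySem.Set.empty)) univ)))
    PySem.Dict.empty).items

-- ===== PRECONDITION & SPEC =====
def Spec_calculate_support (transactions : List (List Int)) (itemsets : List (List Int)) (out : List (List Int × Int)) : Prop := out = calculate_support_alt transactions itemsets
instance (transactions : List (List Int)) (itemsets : List (List Int)) (out : List (List Int × Int)) : Decidable (Spec_calculate_support transactions itemsets out) := by unfold Spec_calculate_support; infer_instance

-- ===== CLAIM (what is proved, stated in full; the proofs are below) =====
def Claim_equal_calculate_support : Prop := ∀ (transactions : List (List Int)) (itemsets : List (List Int)), Dom_calculate_support transactions itemsets → Spec_calculate_support transactions itemsets (calculate_support transactions itemsets)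

-- ===== LEMMAS AND PROOFS =====

-- modify on a just-inserted key = insert of the updated value
theorem pv_modify_insert_self {κ ν : Type} [BEq κ] [LawfulBEq κ]
    (d : PySem.Dict κ ν) (k : κ) (v d0 : ν) (f : ν → ν) :
    (d.insert k v).modify k d0 f = d.insert k (f v) := by
  simp [PySem.Dict.modify, PySem.Dict.getD_insert_self, PySem.Dict.insert_insert_self]

-- A's inner loop over the transactions nets out to a single insert of the count
theorem pv_innerA (s : List Int) (P : List Int → Bool) :
    ∀ (ts : List (List Int)) (d : PySem.Dict (List Int) Int) (v : Int),
    ts.foldl (fun c t => if P t then c.modify s 0 (· + 1) else c) (d.insert s v)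
      = d.insert s (v + (ts.countP P : Int)) := by
  intro ts
  induction ts with
  | nil => intro d v; simp
  | cons t ts ih =>
    intro d v
    rw [List.foldl_cons]
    by_cases h : P t = true
    · rw [if_pos h, pv_modify_insert_self, ih d (v + 1)]
      congr 1
      simp [h]
      omega
    · rw [if_neg (by simp [h]), ih d v]
      congr 2
      simp [h]

-- membership in a posting set after the inner loop over one transaction
theorem pv_inner_post_mem (j : Nat) :
    ∀ (t : List Int) (d : PySem.Dict Int (PySem.Set Nat)) (x : Int) (i : Nat),
    (i ∈ (t.foldl (fun d item => d.modify item PySem.Set.empty (fun s => s.add j)) d).getD x PySem.Set.empty)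
      ↔ (i ∈ d.getD x PySem.Set.empty ∨ (x ∈ t ∧ i = j)) := by
  intro t
  induction t with
  | nil => intro d x i; simp
  | cons a t ih =>
    intro d x i
    rw [List.foldl_cons, ih]
    by_cases hx : x = a
    · subst hx
      rw [PySem.Dict.getD_modify_self]
      simp [PySem.Set.mem_add]
      tauto
    · rw [PySem.Dict.getD_modify_of_ne _ _ _ hx]
      simp [hx]

-- membership in a posting set after the whole index-building loop
theorem pv_post_mem :
    ∀ (e : List (List Int × Nat)) (d : PySem.Dict Int (PySem.Set Nat)) (x : Int) (i : Nat),
    (i ∈ (e.foldl (fun d p => p.1.foldl (fun d item => d.modify item PySem.Set.empty (fun s => s.add p.2)) d) d).getD x PySem.Set.empty)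
      ↔ (i ∈ d.getD x PySem.Set.empty ∨ ∃ p ∈ e, x ∈ p.1 ∧ i = p.2) := by
  intro e
  induction e with
  | nil => intro d x i; simp
  | cons p e ih =>
    intro d x i
    rw [List.foldl_cons, ih, pv_inner_post_mem]
    simp only [List.mem_cons]
    constructor
    · rintro (((h | h) | h))
      · exact Or.inl h
      · exact Or.inr ⟨p, Or.inl rfl, h⟩
      · obtain ⟨q, hq, hh⟩ := h; exact Or.inr ⟨q, Or.inr hq, hh⟩
    · rintro (h | ⟨q, (rfl | hq), hh⟩)
      · exact Or.inl (Or.inl h)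
      · exact Or.inl (Or.inr hh)
      · exact Or.inr ⟨q, hq, hh⟩

-- membership in the intersection accumulator
theorem pv_acc_mem (g : Int → PySem.Set Nat) :
    ∀ (s : List Int) (a : PySem.Set Nat) (i : Nat),
    (i ∈ s.foldl (fun acc item => acc.inter (g item)) a) ↔ (i ∈ a ∧ ∀ x ∈ s, i ∈ g x) := by
  intro s
  induction s with
  | nil => intro a i; simp
  | cons x s ih =>
    intro a i
    rw [List.foldl_cons, ih]
    simp only [PySem.Set.mem_inter, List.mem_cons]
    constructor
    · rintro ⟨⟨h1, h2⟩, h3⟩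
      exact ⟨h1, by rintro y (rfl | hy); exacts [h2, h3 y hy]⟩
    · rintro ⟨h1, h3⟩
      exact ⟨⟨h1, h3 x (Or.inl rfl)⟩, fun y hy => h3 y (Or.inr hy)⟩

-- the accumulator stays duplicate-free
theorem pv_acc_nodup (g : Int → PySem.Set Nat) :
    ∀ (s : List Int) (a : PySem.Set Nat), a.Nodup →
    (s.foldl (fun acc item => acc.inter (g item)) a).Nodup := by
  intro s
  induction s with
  | nil => intro a h; simpa using h
  | cons x s ih =>
    intro a h
    exact ih _ (PySem.Set.nodup_inter _ _ h)

-- counting over indices = counting over the list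
theorem pv_count_range (q : List Int → Bool) :
    ∀ (ts : List (List Int)),
    ((List.range ts.length).filter (fun i => q (ts.getD i []))).length = ts.countP q := by
  intro ts
  induction ts with
  | nil => simp
  | cons t ts ih =>
    rw [List.length_cons, List.range_succ_eq_map, List.filter_cons]
    have key : (((List.range ts.length).map Nat.succ).filter
        (fun i => q ((t :: ts).getD i []))).length = ts.countP q := by
      rw [List.filter_map, List.length_map]
      have hcomp : ((fun i => q ((t :: ts).getD i [])) ∘ Nat.succ) = (fun i => q (ts.getD i [])) := by
        funext i
        simp
      rw [hcomp, ih]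
    by_cases h : q t = true
    · rw [if_pos (by simpa using h), List.length_cons, key]
      simp [h]
    · rw [if_neg (by simpa using h), key]
      simp [h]

-- the heart: the intersection size equals A's subset count
theorem pv_len_acc (transactions : List (List Int)) (itemset : List Int) :
    PySem.Set.len (itemset.foldl
      (fun acc item => acc.inter
        ((transactions.zipIdx.foldl
          (fun d p => p.1.foldl (fun d item => d.modify item PySem.Set.empty (fun s => s.add p.2)) d)
          PySem.Dict.empty).getD item PySem.Set.empty))
      (PySem.Set.ofList (List.range transactions.length)))
    = ((transactions.countP (fun t => PySem.Set.issubset (PySem.Set.ofList itemset) (PySem.Set.ofList t))) : Int) := by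
  set g : Int → PySem.Set Nat := fun item =>
    (transactions.zipIdx.foldl
      (fun d p => p.1.foldl (fun d item => d.modify item PySem.Set.empty (fun s => s.add p.2)) d)
      PySem.Dict.empty).getD item PySem.Set.empty with hg
  set acc := itemset.foldl (fun acc item => acc.inter (g item))
      (PySem.Set.ofList (List.range transactions.length)) with hacc
  have hmem : ∀ i : Nat, i ∈ acc ↔
      (i < transactions.length ∧ ∀ x ∈ itemset, x ∈ transactions.getD i []) := by
    intro i
    rw [hacc, pv_acc_mem]
    have huniv : i ∈ PySem.Set.ofList (List.range transactions.length) ↔ i < transactions.length := by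
      rw [PySem.Set.mem_ofList, List.mem_range]
    rw [huniv]
    constructor
    · rintro ⟨hi, hall⟩
      refine ⟨hi, fun x hx => ?_⟩
      have hthis := hall x hx
      simp only [hg] at hthis
      rw [pv_post_mem] at hthis
      rcases hthis with h | ⟨⟨p1, p2⟩, hp, hxp, rfl⟩
      · simp [PySem.Dict.getD_empty, PySem.Set.empty] at h
      · have hget := List.mk_mem_zipIdx_iff_getElem?.1 hp
        rcases List.getElem?_eq_some_iff.1 hget with ⟨hlt, hpeq⟩
        rw [List.getD_eq_getElem?_getD, List.getElem?_eq_getElem hlt]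
        simp only [Option.getD_some]
        rw [hpeq]
        exact hxp
    · rintro ⟨hi, hall⟩
      refine ⟨hi, fun x hx => ?_⟩
      simp only [hg]
      rw [pv_post_mem]
      refine Or.inr ⟨(transactions[i], i), ?_, ?_, rfl⟩
      · exact List.mk_mem_zipIdx_iff_getElem?.2 (List.getElem?_eq_getElem hi)
      · have hthis := hall x hx
        rw [List.getD_eq_getElem?_getD, List.getElem?_eq_getElem hi] at hthis
        simpa using hthis
  have hnd : acc.Nodup := by
    rw [hacc]
    exact pv_acc_nodup g itemset _ (PySem.Set.nodup_ofList _)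
  set q : List Int → Bool :=
    fun t => PySem.Set.issubset (PySem.Set.ofList itemset) (PySem.Set.ofList t) with hq
  have hqiff : ∀ t, q t = true ↔ ∀ x ∈ itemset, x ∈ t := by
    intro t
    rw [hq]
    rw [PySem.Set.issubset_iff]
    constructor
    · intro h x hx
      have := h x (by rwa [PySem.Set.mem_ofList])
      rwa [PySem.Set.mem_ofList] at this
    · intro h x hx
      rw [PySem.Set.mem_ofList] at hx ⊢
      exact h x hx
  have hperm : acc.Perm ((List.range transactions.length).filter (fun i => q (transactions.getD i []))) := by
    rw [List.perm_ext_iff_of_nodup hnd (List.Nodup.filter _ List.nodup_range)]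
    intro i
    rw [hmem, List.mem_filter, List.mem_range, hqiff]
  rw [PySem.Set.len]
  rw [hperm.length_eq, pv_count_range]

-- the two per-itemset step functions agree, hence the whole folds agree
theorem pv_fold_eq (transactions : List (List Int)) :
    ∀ (itemsets : List (List Int)) (d : PySem.Dict (List Int) Int),
    itemsets.foldl
      (fun count itemset =>
        transactions.foldl
          (fun count transaction =>
            if PySem.Set.issubset (PySem.Set.ofList itemset) (PySem.Set.ofList transaction) then
              count.modify itemset 0 (· + 1)
            else count)
          (count.insert itemset 0)) d
    = itemsets.foldl
      (fun count itemset =>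
        count.insert itemset
          (PySem.Set.len (itemset.foldl
            (fun acc item => acc.inter
              ((transactions.zipIdx.foldl
                (fun d p => p.1.foldl (fun d item => d.modify item PySem.Set.empty (fun s => s.add p.2)) d)
                PySem.Dict.empty).getD item PySem.Set.empty))
            (PySem.Set.ofList (List.range transactions.length))))) d := by
  intro itemsets
  induction itemsets with
  | nil => intro d; rfl
  | cons s rest ih =>
    intro d
    rw [List.foldl_cons, List.foldl_cons, pv_innerA s _ transactions d 0, pv_len_acc transactions s,
      zero_add, ih]

-- ===== VERDICT (by name: the statement is the Claim_ definition above) =====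
theorem calculate_support_spec : Claim_equal_calculate_support := by
  intro transactions itemsets _
  unfold Spec_calculate_support calculate_support calculate_support_alt
  rw [pv_fold_eq transactions itemsets PySem.Dict.empty]
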